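-- pv_equiv track=rewrite | github.com/djfoote/nes-python | disassembler.py | get_address_string
-- ===== SOURCE A (Python) =====
-- def get_address_string(addr_mode, extra_bytes):
-- 	number_string = '$'
-- 	for byte in extra_bytes[::-1]:  # 6502 CPU is little-endian.
-- 		number_string += format(byte, '02X')
--
-- 	if addr_mode == 'ACC':
-- 		return 'A'
-- 	elif addr_mode == 'ABS':
-- 		return number_string
-- 	elif addr_mode == 'ABSX':
-- 		return f'{number_string},X'
-- 	elif addr_mode == 'ABSY':
-- 		return f'{number_string},Y'
-- 	elif addr_mode == 'IMM':
-- 		return f'#{number_string}'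
-- 	elif addr_mode == 'IMP':
-- 		return ''
-- 	elif addr_mode == 'IND':
-- 		return f'({number_string})'
-- 	elif addr_mode == 'INDX':
-- 		return f'({number_string},X)'
-- 	elif addr_mode == 'INDY':
-- 		return f'({number_string}),Y'
-- 	elif addr_mode == 'REL':
-- 		return number_string
-- 	elif addr_mode == 'ZP':
-- 		return number_string
-- 	elif addr_mode == 'ZPX':
-- 		return f'{number_string},X'
-- 	elif addr_mode == 'ZPY':
-- 		return f'{number_string},Y'
-- 	else:
-- 		raise ValueError(f'Unknown addressing mode {addr_mode}')
-- ===== SOURCE B (Python) =====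
-- _VALID_MODES = frozenset(
--     ('ACC', 'ABS', 'ABSX', 'ABSY', 'IMM', 'IMP', 'IND', 'INDX', 'INDY',
--      'REL', 'ZP', 'ZPX', 'ZPY'))
--
--
-- def get_address_string(addr_mode, extra_bytes):
--     # 6502 CPU is little-endian.
--     number_string = '$' + ''.join(format(byte, '02X') for byte in reversed(extra_bytes))
--     if addr_mode not in _VALID_MODES:
--         raise ValueError(f'Unknown addressing mode {addr_mode}')
--     # The operand syntax is determined by the mode name's structure, not by a
--     # per-mode table: ACC/IMP/IMM are special; IND* wraps in parentheses
--     # (indexed-indirect puts ,X inside, indirect-indexed puts ,Y outside);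
--     # every other mode appends ,X/,Y according to its trailing index letter.
--     if addr_mode == 'ACC':
--         return 'A'
--     if addr_mode == 'IMP':
--         return ''
--     if addr_mode == 'IMM':
--         return '#' + number_string
--     suffix = ',' + addr_mode[-1] if addr_mode[-1] in 'XY' else ''
--     if addr_mode.startswith('IND'):
--         if suffix == ',X':
--             return '(' + number_string + suffix + ')'
--         return '(' + number_string + ')' + suffix
--     return number_string + suffix
-- ===== Notes on version B (the rewrite author's own statement) =====
-- stated objective: alternative
-- what changed: Instead of 13 per-mode branches each spelling out its full result, B derives the operand syntax structurally from the mode name itself: three special cases (ACC/IMP/IMM), an index suffix computed from the mode's trailing X/Y letter, and a parenthesis rule for the IND family; the number string is built by a join over reversed(extra_bytes) instead of loop accumulation.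
import Mathlib
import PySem

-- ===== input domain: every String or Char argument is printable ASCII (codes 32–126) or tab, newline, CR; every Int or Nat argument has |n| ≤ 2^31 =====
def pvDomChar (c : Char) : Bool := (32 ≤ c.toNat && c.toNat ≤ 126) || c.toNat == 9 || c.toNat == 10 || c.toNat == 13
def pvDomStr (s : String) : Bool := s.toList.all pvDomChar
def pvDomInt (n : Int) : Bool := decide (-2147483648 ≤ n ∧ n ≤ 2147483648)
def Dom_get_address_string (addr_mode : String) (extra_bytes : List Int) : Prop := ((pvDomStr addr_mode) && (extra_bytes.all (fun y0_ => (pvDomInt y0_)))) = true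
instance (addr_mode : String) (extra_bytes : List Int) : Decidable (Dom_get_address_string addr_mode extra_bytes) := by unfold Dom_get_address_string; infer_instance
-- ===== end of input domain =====

-- B derives the operand syntax structurally from the mode name (trailing X/Y index
-- letter, IND-family parenthesis rule, three special cases) instead of A's 13 per-mode
-- branches, and joins the reversed bytes instead of loop accumulation (objective:
-- alternative; same cost).

-- ===== PORT A =====

-- format(d, 'X') digit: exact for 0 ≤ d < 16
def hexDigit (d : Nat) : Char := if d < 10 then Char.ofNat (48 + d) else Char.ofNat (55 + d)

-- uppercase hex digits of n (no sign, no prefix); fuel-driven, exact for every Nat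
def hexAux : Nat → Nat → List Char
  | 0, n => [hexDigit (n % 16)]
  | f + 1, n => if n < 16 then [hexDigit n] else hexAux f (n / 16) ++ [hexDigit (n % 16)]

def hexChars (n : Nat) : List Char := hexAux n n

-- format(b, '02X'): exact — negatives print '-' + digits (width 2 is already met),
-- non-negatives are zero-padded to width 2
def fmt02X (b : Int) : List Char :=
  if b < 0 then '-' :: hexChars b.natAbs
  else
    let d := hexChars b.toNat
    if d.length < 2 then '0' :: d else d

def get_address_string (addr_mode : String) (extra_bytes : List Int) : String :=
  -- extra_bytes[::-1] never raises (step -1), so getD [] is exact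
  let number_string : List Char :=
    ((PySem.List.slice? extra_bytes none none (-1)).getD []).foldl
      (fun acc byte => acc ++ fmt02X byte) ['$']
  if addr_mode == "ACC" then "A"
  else if addr_mode == "ABS" then String.ofList number_string
  else if addr_mode == "ABSX" then String.ofList (number_string ++ [',', 'X'])
  else if addr_mode == "ABSY" then String.ofList (number_string ++ [',', 'Y'])
  else if addr_mode == "IMM" then String.ofList ('#' :: number_string)
  else if addr_mode == "IMP" then ""
  else if addr_mode == "IND" then String.ofList ('(' :: number_string ++ [')'])
  else if addr_mode == "INDX" then String.ofList ('(' :: number_string ++ [',', 'X', ')'])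
  else if addr_mode == "INDY" then String.ofList ('(' :: number_string ++ [')', ',', 'Y'])
  else if addr_mode == "REL" then String.ofList number_string
  else if addr_mode == "ZP" then String.ofList number_string
  else if addr_mode == "ZPX" then String.ofList (number_string ++ [',', 'X'])
  else if addr_mode == "ZPY" then String.ofList (number_string ++ [',', 'Y'])
  else ""  -- raise ValueError: unreachable under Pre_

-- ===== PORT B =====

def pvValidModes : PySem.Set String := PySem.Set.ofList
  ["ACC", "ABS", "ABSX", "ABSY", "IMM", "IMP", "IND", "INDX", "INDY", "REL", "ZP", "ZPX", "ZPY"]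

def get_address_string_alt (addr_mode : String) (extra_bytes : List Int) : String :=
  let number_string : List Char := '$' :: (extra_bytes.reverse.map fmt02X).flatten
  if ¬ (addr_mode ∈ pvValidModes) then ""  -- raise ValueError: unreachable under Pre_
  else if addr_mode == "ACC" then "A"
  else if addr_mode == "IMP" then ""
  else if addr_mode == "IMM" then String.ofList ('#' :: number_string)
  else
    -- suffix = ',' + addr_mode[-1] if addr_mode[-1] in 'XY' else ''
    let suffix : List Char :=
      match addr_mode.toList.getLast? with
      | some 'X' => [',', 'X']
      | some 'Y' => [',', 'Y']
      | _ => []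
    if ['I', 'N', 'D'].isPrefixOf addr_mode.toList then
      if suffix == [',', 'X'] then String.ofList ('(' :: number_string ++ suffix ++ [')'])
      else String.ofList ('(' :: number_string ++ [')'] ++ suffix)
    else String.ofList (number_string ++ suffix)

-- ===== PRECONDITION & SPEC =====
-- Pre_ excludes exactly the unknown addressing modes, on which A raises ValueError.
def Pre_get_address_string (addr_mode : String) (extra_bytes : List Int) : Prop :=
  addr_mode ∈ ["ACC", "ABS", "ABSX", "ABSY", "IMM", "IMP", "IND", "INDX", "INDY", "REL", "ZP", "ZPX", "ZPY"]
instance (addr_mode : String) (extra_bytes : List Int) : Decidable (Pre_get_address_string addr_mode extra_bytes) := by unfold Pre_get_address_string; infer_instance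

def pvWitness_get_address_string : String × List Int := ("INDX", [255, 3])

def Spec_get_address_string (addr_mode : String) (extra_bytes : List Int) (out : String) : Prop := out = get_address_string_alt addr_mode extra_bytes
instance (addr_mode : String) (extra_bytes : List Int) (out : String) : Decidable (Spec_get_address_string addr_mode extra_bytes out) := by unfold Spec_get_address_string; infer_instance

-- ===== CLAIM (what is proved, stated in full; the proofs are below) =====
def Claim_equal_get_address_string : Prop := ∀ (addr_mode : String) (extra_bytes : List Int), Dom_get_address_string addr_mode extra_bytes → Pre_get_address_string addr_mode extra_bytes → Spec_get_address_string addr_mode extra_bytes (get_address_string addr_mode extra_bytes)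

-- ===== LEMMAS AND PROOFS =====

-- both ports build the same number string
theorem number_string_eq (xs : List Int) :
    (List.map fmt02X ((PySem.List.slice? xs none none (-1)).getD [])).flatten
      = (List.map fmt02X xs).reverse.flatten := by
  simp [PySem.List.slice?_none_none_neg_one, List.map_reverse]

-- ===== VERDICT (by name: the statement is the Claim_ definition above) =====
theorem get_address_string_spec : Claim_equal_get_address_string := by
  intro a xs _ hpre
  unfold Spec_get_address_string
  unfold Pre_get_address_string at hpre
  simp only [List.mem_cons, List.not_mem_nil, or_false] at hpre
  rcases hpre with rfl|rfl|rfl|rfl|rfl|rfl|rfl|rfl|rfl|rfl|rfl|rfl|rfl <;>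
    simp [get_address_string, get_address_string_alt, number_string_eq, pvValidModes]
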